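-- pv_equiv track=rewrite | github.com/makerjy/sso_final_prj | text-to-sql/backend/app/services/agents/sql_error_templates.py | _strip_top_level_order_by
-- ===== SOURCE A (Python) =====
-- def _strip_top_level_order_by(sql: str) -> tuple[str, bool]:
--     text = str(sql or "").strip().rstrip(";")
--     if not text:
--         return text, False
--     upper = text.upper()
--     depth = 0
--     in_single = False
--     order_pos = -1
--     i = 0
--     while i < len(upper):
--         ch = upper[i]
--         if in_single:
--             if ch == "'":
--                 if i + 1 < len(upper) and upper[i + 1] == "'":
--                     i += 2
--                     continue
--                 in_single = False
--             i += 1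
--             continue
--         if ch == "'":
--             in_single = True
--             i += 1
--             continue
--         if ch == "(":
--             depth += 1
--             i += 1
--             continue
--         if ch == ")":
--             depth = max(0, depth - 1)
--             i += 1
--             continue
--         if depth == 0 and upper.startswith("ORDER BY", i):
--             prev = upper[i - 1] if i > 0 else " "
--             if not (prev.isalnum() or prev in {"_", "$", "#"}):
--                 order_pos = i
--         i += 1
--
--     if order_pos < 0:
--         return text, False
--     return text[:order_pos].rstrip(), True
-- ===== SOURCE B (Python) =====
-- def _strip_top_level_order_by(sql: str) -> tuple[str, bool]:
--     text = str(sql or "").strip().rstrip(";")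
--     if not text:
--         return text, False
--     upper = text.upper()
--     best = -1
--     start = 0
--     while True:
--         pos = upper.find("ORDER BY", start)
--         if pos < 0:
--             break
--         start = pos + 1
--         prev = upper[pos - 1] if pos > 0 else " "
--         if prev.isalnum() or prev in "_$#":
--             continue
--         # scan the prefix once: parenthesis depth outside single-quoted strings
--         depth = 0
--         state = 0  # 0 = outside quotes, 1 = inside quotes, 2 = just saw a quote while inside
--         for ch in upper[:pos]:
--             if state == 1:
--                 if ch == "'":
--                     state = 2
--             elif state == 2:
--                 if ch == "'":
--                     state = 1
--                 else:
--                     state = 0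
--                     if ch == "(":
--                         depth += 1
--                     elif ch == ")":
--                         depth = max(0, depth - 1)
--             else:
--                 if ch == "'":
--                     state = 1
--                 elif ch == "(":
--                     depth += 1
--                 elif ch == ")":
--                     depth = max(0, depth - 1)
--         if state != 1 and depth == 0:
--             best = pos
--     if best < 0:
--         return text, False
--     return text[:best].rstrip(), True
-- ===== Notes on version B (the rewrite author's own statement) =====
-- stated objective: faster
-- what changed: A makes one incremental per-character pass carrying quote/paren state and recording candidates as it goes; B instead enumerates the occurrences of the pattern with str.find and judges each occurrence by a fresh scan of its prefix (quote state and clamped paren depth), keeping the last occurrence that is top-level.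
import Mathlib
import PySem

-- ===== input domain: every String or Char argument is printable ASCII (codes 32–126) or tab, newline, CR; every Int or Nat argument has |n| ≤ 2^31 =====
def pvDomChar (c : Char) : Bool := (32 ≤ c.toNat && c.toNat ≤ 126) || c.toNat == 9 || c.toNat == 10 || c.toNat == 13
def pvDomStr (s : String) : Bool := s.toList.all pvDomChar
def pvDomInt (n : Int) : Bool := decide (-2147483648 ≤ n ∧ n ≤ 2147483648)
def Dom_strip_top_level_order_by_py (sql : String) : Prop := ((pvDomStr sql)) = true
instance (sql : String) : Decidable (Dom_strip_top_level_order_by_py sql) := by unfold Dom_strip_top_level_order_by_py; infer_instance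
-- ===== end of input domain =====

-- B replaces A's single incremental per-character state machine by enumerating the pattern
-- occurrences via find and judging each one by a fresh scan of its prefix (objective: faster,
-- measured).

-- shared with both Pythons: text = str(sql or "").strip().rstrip(";")
-- rstrip(";") ported by hand (exact: removes all trailing ';' characters)
def pvRstripSemi (cs : List Char) : List Char := (cs.reverse.dropWhile (· == ';')).reverse

def pvPat : List Char := "ORDER BY".toList

-- prev = upper[i-1] if i > 0 else " "; not (prev.isalnum() or prev in {"_","$","#"})
def pvPrevOk (u : List Char) (i : Nat) : Bool :=
  let prev := if 0 < i then u.getD (i - 1) ' ' else ' '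
  !(PySem.Chars.isalnum prev || prev == '_' || prev == '$' || prev == '#')

-- upper.startswith("ORDER BY", i)
def pvAt (u : List Char) (i : Nat) : Bool := pvPat.isPrefixOf (u.drop i)

-- ===== PORT A =====
-- the while loop of A, step for step (depth : Nat since Python clamps with max(0, depth-1))
def pvALoop (u : List Char) (i : Nat) (depth : Nat) (in_single : Bool)
    (order_pos : Option Nat) : Option Nat :=
  if h : i < u.length then
    let ch := u.getD i ' '
    if in_single then
      if ch == '\'' then
        if i + 1 < u.length && u.getD (i + 1) ' ' == '\'' then
          pvALoop u (i + 2) depth in_single order_pos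
        else
          pvALoop u (i + 1) depth false order_pos
      else pvALoop u (i + 1) depth in_single order_pos
    else if ch == '\'' then pvALoop u (i + 1) depth true order_pos
    else if ch == '(' then pvALoop u (i + 1) (depth + 1) in_single order_pos
    else if ch == ')' then pvALoop u (i + 1) (depth - 1) in_single order_pos
    else if depth == 0 && pvAt u i && pvPrevOk u i then
      pvALoop u (i + 1) depth in_single (some i)
    else pvALoop u (i + 1) depth in_single order_pos
  else order_pos
  termination_by u.length - i

def strip_top_level_order_by_py (sql : String) : String × Bool :=
  let text := pvRstripSemi (PySem.Chars.strip (if sql == "" then "" else sql).toList)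
  if text.isEmpty then (String.ofList text, false)
  else
    let upper := PySem.Chars.upper text
    match pvALoop upper 0 0 false none with
    | none => (String.ofList text, false)
    | some p => (String.ofList (PySem.Chars.rstrip (text.take p)), true)

-- ===== PORT B =====
-- one step of B's prefix scanner: state 0 = outside quotes, 1 = inside, 2 = just saw a quote inside
def pvStep (st : Nat × Nat) (ch : Char) : Nat × Nat :=
  if st.2 == 1 then
    if ch == '\'' then (st.1, 2) else (st.1, 1)
  else if st.2 == 2 then
    if ch == '\'' then (st.1, 1)
    else if ch == '(' then (st.1 + 1, 0)
    else if ch == ')' then (st.1 - 1, 0)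
    else (st.1, 0)
  else
    if ch == '\'' then (st.1, 1)
    else if ch == '(' then (st.1 + 1, 0)
    else if ch == ')' then (st.1 - 1, 0)
    else (st.1, 0)

def pvPrefScan (cs : List Char) : Nat × Nat := cs.foldl pvStep (0, 0)

def pvTopLevel (u : List Char) (pos : Nat) : Bool :=
  let st := pvPrefScan (u.take pos)
  st.2 != 1 && st.1 == 0

-- upper.find("ORDER BY", start), ported by hand (exact for the non-empty pattern "ORDER BY":
-- first j ≥ start at which the pattern occurs, none = Python's -1)
def pvFindFrom (u pat : List Char) (j : Nat) : Option Nat :=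
  if h : j < u.length then
    if pat.isPrefixOf (u.drop j) then some j else pvFindFrom u pat (j + 1)
  else none
  termination_by u.length - j

theorem pvFindFrom_some_ge {u pat : List Char} {j pos : Nat}
    (h : pvFindFrom u pat j = some pos) : j ≤ pos ∧ pos < u.length := by
  fun_induction pvFindFrom u pat j with
  | case1 j h1 h2 => simp_all
  | case2 j h1 h2 ih => exact ⟨Nat.le_of_succ_le (ih h).1, (ih h).2⟩
  | case3 j h1 => simp_all

def pvBLoop (u : List Char) (start : Nat) (best : Option Nat) : Option Nat :=
  match h : pvFindFrom u pvPat start with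
  | none => best
  | some pos =>
      pvBLoop u (pos + 1)
        (if pvPrevOk u pos && pvTopLevel u pos then some pos else best)
  termination_by u.length - start
  decreasing_by
    have := pvFindFrom_some_ge h; omega

def strip_top_level_order_by_py_alt (sql : String) : String × Bool :=
  let text := pvRstripSemi (PySem.Chars.strip (if sql == "" then "" else sql).toList)
  if text.isEmpty then (String.ofList text, false)
  else
    let upper := PySem.Chars.upper text
    match pvBLoop upper 0 none with
    | none => (String.ofList text, false)
    | some p => (String.ofList (PySem.Chars.rstrip (text.take p)), true)

-- ===== PRECONDITION & SPEC =====
def Spec_strip_top_level_order_by_py (sql : String) (out : String × Bool) : Prop := out = strip_top_level_order_by_py_alt sql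
instance (sql : String) (out : String × Bool) : Decidable (Spec_strip_top_level_order_by_py sql out) := by unfold Spec_strip_top_level_order_by_py; infer_instance

-- ===== CLAIM (what is proved, stated in full; the proofs are below) =====
def Claim_equal_strip_top_level_order_by_py : Prop := ∀ (sql : String), Dom_strip_top_level_order_by_py sql → Spec_strip_top_level_order_by_py sql (strip_top_level_order_by_py sql)

-- ===== LEMMAS AND PROOFS =====

-- common value both loops compute: the last i in js that is a top-level ORDER BY candidate
def pvFold (u : List Char) (js : List Nat) (best : Option Nat) : Option Nat :=
  js.foldl (fun b j => if pvAt u j && pvPrevOk u j && pvTopLevel u j then some j else b) best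

-- one foldl step of pvFold
theorem pvFold_cons (u : List Char) (j : Nat) (js : List Nat) (best : Option Nat) :
    pvFold u (j :: js) best
      = pvFold u js (if pvAt u j && pvPrevOk u j && pvTopLevel u j then some j else best) := rfl

theorem pvFold_append (u : List Char) (a b : List Nat) (best : Option Nat) :
    pvFold u (a ++ b) best = pvFold u b (pvFold u a best) := by
  simp [pvFold, List.foldl_append]

theorem pvFold_skip (u : List Char) : ∀ (js : List Nat) (best : Option Nat),
    (∀ j ∈ js, pvAt u j = false) → pvFold u js best = best := by
  intro js
  induction js with
  | nil => intro best h; rfl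
  | cons j js ih =>
    intro best h
    rw [pvFold_cons, h j (by simp)]
    simp only [Bool.false_and, Bool.false_eq_true, if_false]
    exact ih _ (fun k hk => h k (by simp [hk]))

theorem pvRange'_cons (i n : Nat) (h : i < n) :
    List.range' i (n - i) = i :: List.range' (i + 1) (n - (i + 1)) := by
  rw [show n - i = (n - (i + 1)) + 1 by omega, List.range'_succ]

theorem pvPrefScan_succ (u : List Char) (i : Nat) (h : i < u.length) :
    pvPrefScan (u.take (i + 1)) = pvStep (pvPrefScan (u.take i)) (u.getD i ' ') := by
  have ht : u.take (i + 1) = u.take i ++ [u[i]] := by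
    rw [List.take_add_one]
    simp [List.getElem?_eq_getElem h]
  have hg : u.getD i ' ' = u[i] := by
    simp [List.getD_eq_getElem?_getD, List.getElem?_eq_getElem h]
  simp only [pvPrefScan]
  rw [ht, List.foldl_append, hg]
  rfl

theorem pvAt_false (u : List Char) (i : Nat) (h : i < u.length)
    (hne : ¬ u.getD i ' ' = 'O') : pvAt u i = false := by
  simp only [List.getD_eq_getElem?_getD, List.getElem?_eq_getElem h, Option.getD_some] at hne
  have hp : pvPat = 'O' :: ['R','D','E','R',' ','B','Y'] := rfl
  have hb : ('O' == u[i]) = false := by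
    simp only [beq_eq_false_iff_ne, ne_eq]
    exact fun hc => hne hc.symm
  have hu : pvAt u i
      = (('O' == u[i]) && (['R','D','E','R',' ','B','Y'].isPrefixOf (u.drop (i + 1)))) := by
    rw [pvAt, List.drop_eq_getElem_cons h, hp]
    rfl
  rw [hu, hb, Bool.false_and]

theorem pvFold_cons_skip (u : List Char) (j : Nat) (js : List Nat) (best : Option Nat)
    (h : pvAt u j = false) : pvFold u (j :: js) best = pvFold u js best := by
  rw [pvFold_cons, h]; simp

theorem pvFold_cons_top (u : List Char) (j : Nat) (js : List Nat) (best : Option Nat)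
    (h : pvTopLevel u j = false) : pvFold u (j :: js) best = pvFold u js best := by
  rw [pvFold_cons, h]; simp

theorem pvStep_in_quote (st : Nat × Nat) (h : (st.2 == 1) = true) :
    pvStep st '\'' = (st.1, 2) := by simp [pvStep, h]

theorem pvStep_in_other (st : Nat × Nat) (ch : Char) (h : (st.2 == 1) = true)
    (h2 : ¬ ch = '\'') : pvStep st ch = (st.1, 1) := by simp [pvStep, h, h2]

theorem pvStep_two_quote (a : Nat) : pvStep (a, 2) '\'' = (a, 1) := by simp [pvStep]

theorem pvStep_quote (st : Nat × Nat) (h : (st.2 == 1) = false) :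
    pvStep st '\'' = (st.1, 1) := by
  by_cases h2 : (st.2 == 2) = true <;> simp [pvStep, h, h2]

theorem pvStep_open (st : Nat × Nat) (h : (st.2 == 1) = false) :
    pvStep st '(' = (st.1 + 1, 0) := by
  by_cases h2 : (st.2 == 2) = true <;> simp [pvStep, h, h2]

theorem pvStep_close (st : Nat × Nat) (h : (st.2 == 1) = false) :
    pvStep st ')' = (st.1 - 1, 0) := by
  by_cases h2 : (st.2 == 2) = true <;> simp [pvStep, h, h2]

theorem pvStep_other (st : Nat × Nat) (ch : Char) (h : (st.2 == 1) = false)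
    (h1 : ¬ ch = '\'') (h2 : ¬ ch = '(') (h3 : ¬ ch = ')') :
    pvStep st ch = (st.1, 0) := by
  by_cases h4 : (st.2 == 2) = true <;> simp [pvStep, h, h1, h2, h3, h4]

theorem pvALoop_eq (u : List Char) (i d : Nat) (s : Bool) (op : Option Nat)
    (hs : s = ((pvPrefScan (u.take i)).2 == 1))
    (hd : d = (pvPrefScan (u.take i)).1) :
    pvALoop u i d s op = pvFold u (List.range' i (u.length - i)) op := by
  fun_induction pvALoop u i d s op with
  | case1 i depth op hlt ch hq hesc ih =>
    -- inside quote, escaped '' : skip two characters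
    have hq' : u.getD i ' ' = '\'' := by have := hq; simp only [beq_iff_eq] at this; exact this
    have hst : ((pvPrefScan (List.take i u)).2 == 1) = true := hs.symm
    have hlt2 : i + 1 < u.length := by
      have := hesc; simp only [Bool.and_eq_true, decide_eq_true_eq] at this; exact this.1
    have hq2 : u.getD (i + 1) ' ' = '\'' := by
      have := hesc; simp only [Bool.and_eq_true, beq_iff_eq] at this; exact this.2
    have e1 : pvPrefScan (List.take (i + 1) u) = ((pvPrefScan (List.take i u)).1, 2) := by
      rw [pvPrefScan_succ u i hlt, hq', pvStep_in_quote _ hst]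
    have e2 : pvPrefScan (List.take (i + 2) u) = ((pvPrefScan (List.take i u)).1, 1) := by
      rw [show i + 2 = (i + 1) + 1 from rfl, pvPrefScan_succ u (i + 1) hlt2, hq2, e1,
          pvStep_two_quote]
    rw [pvRange'_cons i u.length hlt,
        pvFold_cons_skip u i _ op (pvAt_false u i hlt (by rw [hq']; decide)),
        pvRange'_cons (i + 1) u.length hlt2,
        pvFold_cons_skip u (i + 1) _ op (pvAt_false u (i + 1) hlt2 (by rw [hq2]; decide))]
    exact ih (by rw [e2]; simp) (by rw [e2]; simpa using hd)
  | case2 i depth op hlt ch hq hesc ih =>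
    -- inside quote, closing quote
    have hq' : u.getD i ' ' = '\'' := by have := hq; simp only [beq_iff_eq] at this; exact this
    have hst : ((pvPrefScan (List.take i u)).2 == 1) = true := hs.symm
    have e1 : pvPrefScan (List.take (i + 1) u) = ((pvPrefScan (List.take i u)).1, 2) := by
      rw [pvPrefScan_succ u i hlt, hq', pvStep_in_quote _ hst]
    rw [pvRange'_cons i u.length hlt,
        pvFold_cons_skip u i _ op (pvAt_false u i hlt (by rw [hq']; decide))]
    exact ih (by rw [e1]; simp) (by rw [e1]; simpa using hd)
  | case3 i depth op hlt ch hq ih =>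
    -- inside quote, ordinary character
    have hq' : ¬ u.getD i ' ' = '\'' := by
      have := hq; simp only [beq_iff_eq] at this; exact this
    have hst : ((pvPrefScan (List.take i u)).2 == 1) = true := hs.symm
    have e1 : pvPrefScan (List.take (i + 1) u) = ((pvPrefScan (List.take i u)).1, 1) := by
      rw [pvPrefScan_succ u i hlt, pvStep_in_other _ _ hst hq']
    have htl : pvTopLevel u i = false := by
      simp only [pvTopLevel, bne, hst, Bool.not_true, Bool.false_and]
    rw [pvRange'_cons i u.length hlt, pvFold_cons_top u i _ op htl]
    exact ih (by rw [e1]; simp) (by rw [e1]; simpa using hd)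
  | case4 i depth s op hlt ch hns hq ih =>
    -- outside quote, opening quote
    have hq' : u.getD i ' ' = '\'' := by have := hq; simp only [beq_iff_eq] at this; exact this
    have hsf : s = false := by simpa using hns
    have hst : ((pvPrefScan (List.take i u)).2 == 1) = false := by rw [← hs]; exact hsf
    have e1 : pvPrefScan (List.take (i + 1) u) = ((pvPrefScan (List.take i u)).1, 1) := by
      rw [pvPrefScan_succ u i hlt, hq', pvStep_quote _ hst]
    rw [pvRange'_cons i u.length hlt,
        pvFold_cons_skip u i _ op (pvAt_false u i hlt (by rw [hq']; decide))]
    exact ih (by rw [e1]; simp) (by rw [e1]; simpa using hd)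
  | case5 i depth s op hlt ch hns hq1 hq ih =>
    -- outside quote, '('
    have hq' : u.getD i ' ' = '(' := by have := hq; simp only [beq_iff_eq] at this; exact this
    have hsf : s = false := by simpa using hns
    have hst : ((pvPrefScan (List.take i u)).2 == 1) = false := by rw [← hs]; exact hsf
    have e1 : pvPrefScan (List.take (i + 1) u)
        = ((pvPrefScan (List.take i u)).1 + 1, 0) := by
      rw [pvPrefScan_succ u i hlt, hq', pvStep_open _ hst]
    rw [pvRange'_cons i u.length hlt,
        pvFold_cons_skip u i _ op (pvAt_false u i hlt (by rw [hq']; decide))]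
    exact ih (by rw [e1]; simpa using hsf) (by rw [e1]; simp [hd])
  | case6 i depth s op hlt ch hns hq1 hq2 hq ih =>
    -- outside quote, ')'
    have hq' : u.getD i ' ' = ')' := by have := hq; simp only [beq_iff_eq] at this; exact this
    have hsf : s = false := by simpa using hns
    have hst : ((pvPrefScan (List.take i u)).2 == 1) = false := by rw [← hs]; exact hsf
    have e1 : pvPrefScan (List.take (i + 1) u)
        = ((pvPrefScan (List.take i u)).1 - 1, 0) := by
      rw [pvPrefScan_succ u i hlt, hq', pvStep_close _ hst]
    rw [pvRange'_cons i u.length hlt,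
        pvFold_cons_skip u i _ op (pvAt_false u i hlt (by rw [hq']; decide))]
    exact ih (by rw [e1]; simpa using hsf) (by rw [e1]; simp [hd])
  | case7 i depth s op hlt ch hns hq1 hq2 hq3 hcond ih =>
    -- outside quote, ordinary char, top-level ORDER BY found
    have hq1' : ¬ u.getD i ' ' = '\'' := by
      have := hq1; simp only [beq_iff_eq] at this; exact this
    have hq2' : ¬ u.getD i ' ' = '(' := by
      have := hq2; simp only [beq_iff_eq] at this; exact this
    have hq3' : ¬ u.getD i ' ' = ')' := by
      have := hq3; simp only [beq_iff_eq] at this; exact this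
    have hsf : s = false := by simpa using hns
    have hst : ((pvPrefScan (List.take i u)).2 == 1) = false := by rw [← hs]; exact hsf
    have e1 : pvPrefScan (List.take (i + 1) u) = ((pvPrefScan (List.take i u)).1, 0) := by
      rw [pvPrefScan_succ u i hlt, pvStep_other _ _ hst hq1' hq2' hq3']
    have htl : pvTopLevel u i = (depth == 0) := by
      simp only [pvTopLevel, bne, hst, Bool.not_false, Bool.true_and, hd]
    obtain ⟨⟨hd0, hat⟩, hpr⟩ := by simpa only [Bool.and_eq_true] using hcond
    rw [pvRange'_cons i u.length hlt, pvFold_cons, htl, hat, hpr, hd0]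
    simp only [Bool.and_self, if_true]
    exact ih (by rw [e1]; simpa using hsf) (by rw [e1]; simpa using hd)
  | case8 i depth s op hlt ch hns hq1 hq2 hq3 hcond ih =>
    -- outside quote, ordinary char, no candidate here
    have hq1' : ¬ u.getD i ' ' = '\'' := by
      have := hq1; simp only [beq_iff_eq] at this; exact this
    have hq2' : ¬ u.getD i ' ' = '(' := by
      have := hq2; simp only [beq_iff_eq] at this; exact this
    have hq3' : ¬ u.getD i ' ' = ')' := by
      have := hq3; simp only [beq_iff_eq] at this; exact this
    have hsf : s = false := by simpa using hns
    have hst : ((pvPrefScan (List.take i u)).2 == 1) = false := by rw [← hs]; exact hsf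
    have e1 : pvPrefScan (List.take (i + 1) u) = ((pvPrefScan (List.take i u)).1, 0) := by
      rw [pvPrefScan_succ u i hlt, pvStep_other _ _ hst hq1' hq2' hq3']
    have htl : pvTopLevel u i = (depth == 0) := by
      simp only [pvTopLevel, bne, hst, Bool.not_false, Bool.true_and, hd]
    have hcf : (pvAt u i && pvPrevOk u i && pvTopLevel u i) = false := by
      rw [htl]
      revert hcond
      cases depth == 0 <;> cases pvAt u i <;> cases pvPrevOk u i <;> simp
    rw [pvRange'_cons i u.length hlt, pvFold_cons, hcf]
    simp only [Bool.false_eq_true, if_false]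
    exact ih (by rw [e1]; simpa using hsf) (by rw [e1]; simpa using hd)
  | case9 i depth s op hge =>
    rw [show u.length - i = 0 by omega]
    rfl

theorem pvFindFrom_none {u pat : List Char} {j : Nat}
    (h : pvFindFrom u pat j = none) :
    ∀ k, j ≤ k → k < u.length → pat.isPrefixOf (u.drop k) = false := by
  fun_induction pvFindFrom u pat j with
  | case1 j h1 h2 =>
    cases h
  | case2 j h1 h2 ih =>
    intro k hk1 hk2
    rcases Nat.eq_or_lt_of_le hk1 with rfl | hlt
    · exact Bool.eq_false_iff.mpr (by simpa using h2)
    · exact ih h k hlt hk2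
  | case3 j h1 =>
    intro k hk1 hk2; omega

theorem pvFindFrom_some {u pat : List Char} {j pos : Nat}
    (h : pvFindFrom u pat j = some pos) :
    pat.isPrefixOf (u.drop pos) = true ∧
      ∀ k, j ≤ k → k < pos → pat.isPrefixOf (u.drop k) = false := by
  fun_induction pvFindFrom u pat j with
  | case1 j h1 h2 =>
    injection h with h
    subst h
    exact ⟨h2, fun k hk1 hk2 => absurd hk1 (by omega)⟩
  | case2 j h1 h2 ih =>
    refine ⟨(ih h).1, ?_⟩
    intro k hk1 hk2
    rcases Nat.eq_or_lt_of_le hk1 with rfl | hlt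
    · exact Bool.eq_false_iff.mpr (by simpa using h2)
    · exact (ih h).2 k hlt hk2
  | case3 j h1 =>
    cases h

theorem pvBLoop_eq (u : List Char) (start : Nat) (best : Option Nat) :
    pvBLoop u start best = pvFold u (List.range' start (u.length - start)) best := by
  fun_induction pvBLoop u start best with
  | case1 start best hf =>
    rw [pvFold_skip u _ best]
    intro j hj
    have hm := List.mem_range'_1.mp hj
    exact pvFindFrom_none hf j hm.1 (by omega)
  | case2 start best pos hf ih =>
    obtain ⟨hge, hlt⟩ := pvFindFrom_some_ge hf
    obtain ⟨hat, hnone⟩ := pvFindFrom_some hf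
    have hsplit := List.range'_append (s := start) (m := pos - start) (n := u.length - pos) (step := 1)
    rw [show start + 1 * (pos - start) = pos by omega] at hsplit
    rw [show (pos - start) + (u.length - pos) = u.length - start by omega] at hsplit
    have hskip : pvFold u (List.range' start (pos - start)) best = best :=
      pvFold_skip u _ best (fun j hj => by
        have hm := List.mem_range'_1.mp hj
        exact hnone j hm.1 (by omega))
    rw [← hsplit, pvFold_append, hskip, pvRange'_cons pos u.length hlt, pvFold_cons]
    have hpa : pvAt u pos = true := hat
    rw [hpa, Bool.true_and]
    exact ih

theorem pvLoops_eq (u : List Char) : pvALoop u 0 0 false none = pvBLoop u 0 none := by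
  rw [pvALoop_eq u 0 0 false none (by simp [pvPrefScan]) (by simp [pvPrefScan]),
      pvBLoop_eq]

-- ===== VERDICT (by name: the statement is the Claim_ definition above) =====
theorem strip_top_level_order_by_py_spec : Claim_equal_strip_top_level_order_by_py := by
  intro sql _
  unfold Spec_strip_top_level_order_by_py strip_top_level_order_by_py strip_top_level_order_by_py_alt
  simp only [pvLoops_eq]
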